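-- pv_equiv track=rewrite | github.com/pypi-data/pypi-mirror-403 | packages/inspect-scout/inspect_scout-0.4.11-py3-none-any.whl/inspect_scout/_query/condition_sql.py | _parse_identifier_chain
-- ===== SOURCE A (Python) =====
-- def _parse_identifier_chain(chain: str) -> list[str]:
--     """Parse an identifier chain into its parts."""
--     parts: list[str] = []
--     i = 0
--     n = len(chain)
--
--     while i < n:
--         if chain[i] == ".":
--             i += 1
--             continue
--         elif chain[i] == '"':
--             # Quoted identifier
--             j = i + 1
--             while j < n and chain[j] != '"':
--                 j += 1
--             parts.append(chain[i + 1 : j])  # Without quotes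
--             i = j + 1 if j < n else j
--         elif chain[i].isalpha() or chain[i] == "_":
--             j = i
--             while j < n and (chain[j].isalnum() or chain[j] == "_"):
--                 j += 1
--             parts.append(chain[i:j])
--             i = j
--         else:
--             i += 1
--
--     return parts
-- ===== SOURCE B (Python) =====
-- def _parse_identifier_chain(chain: str) -> list[str]:
--     """Parse an identifier chain into its parts (one-pass state machine)."""
--     parts: list[str] = []
--     state = 0  # 0 normal, 1 inside quotes, 2 inside bare identifier
--     cur: list[str] = []
--     for c in chain:
--         if state == 1:
--             if c == '"':
--                 parts.append("".join(cur))
--                 cur = []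
--                 state = 0
--             else:
--                 cur.append(c)
--         elif state == 2:
--             if c.isalnum() or c == "_":
--                 cur.append(c)
--             else:
--                 parts.append("".join(cur))
--                 cur = []
--                 state = 1 if c == '"' else 0
--         else:
--             if c == '"':
--                 state = 1
--             elif c.isalpha() or c == "_":
--                 state = 2
--                 cur = [c]
--     if state != 0:
--         parts.append("".join(cur))
--     return parts
-- ===== Notes on version B (the rewrite author's own statement) =====
-- stated objective: idiomatic
-- what changed: Replaced A's index-based while loop with nested inner scanning loops and slicing by a single left-to-right pass over the characters driven by a three-state machine (normal / quoted / identifier) that accumulates the current token in a buffer.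
import Mathlib
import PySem

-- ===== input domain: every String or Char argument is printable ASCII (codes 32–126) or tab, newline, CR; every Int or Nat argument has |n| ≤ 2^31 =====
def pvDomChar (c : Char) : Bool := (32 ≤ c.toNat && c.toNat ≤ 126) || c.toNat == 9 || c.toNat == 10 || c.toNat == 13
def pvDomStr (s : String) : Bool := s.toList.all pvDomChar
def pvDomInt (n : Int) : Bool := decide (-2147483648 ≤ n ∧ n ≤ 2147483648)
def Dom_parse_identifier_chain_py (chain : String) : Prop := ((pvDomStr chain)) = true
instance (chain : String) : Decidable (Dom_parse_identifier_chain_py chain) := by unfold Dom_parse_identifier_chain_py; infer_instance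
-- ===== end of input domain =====

-- B replaces A's index-jumping loop with nested inner scans by a single character-at-a-time
-- three-state-machine pass (objective: more idiomatic one pass); return values proved equal.
-- Char.isAlpha / Char.isAlphanum are exact for Python's isalpha()/isalnum() on the ASCII domain.

-- Python isalpha implies isalnum (needed by pvA_loop's termination argument)
theorem pv_alpha_imp_alnum (c : Char) (h : c.isAlpha) : c.isAlphanum := by
  unfold Char.isAlphanum; simp [h]

-- ===== PORT A =====
-- inner 'while j < n and chain[j] != '"'' of the quoted branch
def pvA_scanQuote (cs : List Char) (n j : Nat) : Nat :=
  if h : j < n ∧ cs.getD j ' ' ≠ '"' then pvA_scanQuote cs n (j + 1) else j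
termination_by n - j
decreasing_by omega

-- inner 'while j < n and (chain[j].isalnum() or chain[j] == "_")' of the identifier branch
def pvA_scanIdent (cs : List Char) (n j : Nat) : Nat :=
  if h : j < n ∧ ((cs.getD j ' ').isAlphanum ∨ cs.getD j ' ' = '_') then
    pvA_scanIdent cs n (j + 1)
  else j
termination_by n - j
decreasing_by omega

-- the scan results never move left (needed by pvA_loop's termination)
theorem pvA_scanQuote_ge (cs : List Char) (n j : Nat) : j ≤ pvA_scanQuote cs n j := by
  induction j using pvA_scanQuote.induct (cs := cs) (n := n) with
  | case1 x hc ih => rw [pvA_scanQuote, dif_pos hc]; omega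
  | case2 x hc => rw [pvA_scanQuote, dif_neg hc]

theorem pvA_scanIdent_ge (cs : List Char) (n j : Nat) : j ≤ pvA_scanIdent cs n j := by
  induction j using pvA_scanIdent.induct (cs := cs) (n := n) with
  | case1 x hc ih => rw [pvA_scanIdent, dif_pos hc]; omega
  | case2 x hc => rw [pvA_scanIdent, dif_neg hc]

theorem pvA_scanIdent_gt (cs : List Char) (n j : Nat) (h1 : j < n)
    (h2 : (cs.getD j ' ').isAlphanum ∨ cs.getD j ' ' = '_') :
    j + 1 ≤ pvA_scanIdent cs n j := by
  rw [pvA_scanIdent, dif_pos ⟨h1, h2⟩]; exact pvA_scanIdent_ge cs n (j + 1)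

-- the outer while loop of A; chain[a:b] is ported as (cs.take b).drop a, exact since 0 ≤ a ≤ b here
def pvA_loop (cs : List Char) (n i : Nat) (parts : List String) : List String :=
  if h : i < n then
    let c := cs.getD i ' '
    if c = '.' then pvA_loop cs n (i + 1) parts
    else if hq : c = '"' then
      let j := pvA_scanQuote cs n (i + 1)
      pvA_loop cs n (if j < n then j + 1 else j)
        (parts ++ [String.ofList ((cs.take j).drop (i + 1))])
    else if ha : c.isAlpha ∨ c = '_' then
      let j := pvA_scanIdent cs n i
      pvA_loop cs n j (parts ++ [String.ofList ((cs.take j).drop i)])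
    else pvA_loop cs n (i + 1) parts
  else parts
termination_by n - i
decreasing_by
  · omega
  · have := pvA_scanQuote_ge cs n (i + 1); split <;> omega
  · have : i + 1 ≤ pvA_scanIdent cs n i := by
      apply pvA_scanIdent_gt cs n i h
      rcases ha with ha | ha
      · exact Or.inl (pv_alpha_imp_alnum _ ha)
      · exact Or.inr ha
    omega
  · omega

def parse_identifier_chain_py (chain : String) : List String :=
  pvA_loop chain.toList chain.toList.length 0 []

-- ===== PORT B =====
-- one pass; state 0 = normal, 1 = inside quotes, 2 = inside bare identifier; cur = current token
def pvB_go (cs : List Char) (state : Nat) (cur : List Char) (parts : List String) : List String :=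
  match cs with
  | [] => if state ≠ 0 then parts ++ [String.ofList cur] else parts
  | c :: rest =>
    if state = 1 then
      if c = '"' then pvB_go rest 0 [] (parts ++ [String.ofList cur])
      else pvB_go rest 1 (cur ++ [c]) parts
    else if state = 2 then
      if c.isAlphanum ∨ c = '_' then pvB_go rest 2 (cur ++ [c]) parts
      else pvB_go rest (if c = '"' then 1 else 0) [] (parts ++ [String.ofList cur])
    else
      if c = '"' then pvB_go rest 1 [] parts
      else if c.isAlpha ∨ c = '_' then pvB_go rest 2 [c] parts
      else pvB_go rest 0 [] parts

def parse_identifier_chain_py_alt (chain : String) : List String :=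
  pvB_go chain.toList 0 [] []

-- ===== PRECONDITION & SPEC =====
def Spec_parse_identifier_chain_py (chain : String) (out : List String) : Prop := out = parse_identifier_chain_py_alt chain
instance (chain : String) (out : List String) : Decidable (Spec_parse_identifier_chain_py chain out) := by unfold Spec_parse_identifier_chain_py; infer_instance

-- ===== CLAIM (what is proved, stated in full; the proofs are below) =====
def Claim_equal_parse_identifier_chain_py : Prop := ∀ (chain : String), Dom_parse_identifier_chain_py chain → Spec_parse_identifier_chain_py chain (parse_identifier_chain_py chain)

-- ===== LEMMAS AND PROOFS =====

theorem pvA_scanQuote_le (cs : List Char) (n j : Nat) : j ≤ n → pvA_scanQuote cs n j ≤ n := by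
  induction j using pvA_scanQuote.induct (cs := cs) (n := n) with
  | case1 x hc ih => intro _; rw [pvA_scanQuote, dif_pos hc]; exact ih (by omega)
  | case2 x hc => intro h; rw [pvA_scanQuote, dif_neg hc]; exact h

theorem pvA_scanIdent_le (cs : List Char) (n j : Nat) : j ≤ n → pvA_scanIdent cs n j ≤ n := by
  induction j using pvA_scanIdent.induct (cs := cs) (n := n) with
  | case1 x hc ih => intro _; rw [pvA_scanIdent, dif_pos hc]; exact ih (by omega)
  | case2 x hc => intro h; rw [pvA_scanIdent, dif_neg hc]; exact h

-- segment-peeling fact: (cs.take j).drop k = cs[k] :: (cs.take j).drop (k+1) for k < j ≤ |cs|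
theorem pv_seg_cons (cs : List Char) (j k : Nat) (hk : k < j) (hj : j ≤ cs.length) :
    (cs.take j).drop k = cs.getD k ' ' :: (cs.take j).drop (k + 1) := by
  have hlen : k < (cs.take j).length := by simp [List.length_take]; omega
  rw [List.drop_eq_getElem_cons hlen, List.getElem_take]
  rw [List.getD_eq_getElem cs ' ' (by omega)]

theorem pv_drop_cons (cs : List Char) (k : Nat) (hk : k < cs.length) :
    cs.drop k = cs.getD k ' ' :: cs.drop (k + 1) := by
  rw [List.drop_eq_getElem_cons hk, List.getD_eq_getElem cs ' ' hk]

theorem pv_seg_nil (cs : List Char) (k : Nat) : (cs.take k).drop k = ([] : List Char) := by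
  apply List.drop_eq_nil_of_le; simp [List.length_take]

-- B in quote state, from position k, equals A's quoted-branch outcome
theorem pvB_quote (cs : List Char) (n : Nat) (hn : n = cs.length) (k : Nat) :
    ∀ (cur : List Char) (parts : List String), k ≤ n →
    pvB_go (cs.drop k) 1 cur parts =
      pvB_go (cs.drop (if pvA_scanQuote cs n k < n then pvA_scanQuote cs n k + 1 else pvA_scanQuote cs n k)) 0 []
        (parts ++ [String.ofList (cur ++ (cs.take (pvA_scanQuote cs n k)).drop k)]) := by
  induction k using pvA_scanQuote.induct (cs := cs) (n := n) with
  | case1 k hc ih =>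
    intro cur parts hk
    obtain ⟨hkn, hne⟩ := hc
    rw [pvA_scanQuote, dif_pos ⟨hkn, hne⟩]
    have hj1 : k + 1 ≤ pvA_scanQuote cs n (k + 1) := pvA_scanQuote_ge cs n (k + 1)
    rw [pv_drop_cons cs k (by omega)]
    simp only [pvB_go, if_neg hne]
    rw [ih (cur ++ [cs.getD k ' ']) parts (by omega)]
    rw [pv_seg_cons cs _ k (by omega) (by have := pvA_scanQuote_le cs n (k + 1) (by omega); omega)]
    simp
  | case2 k hc =>
    intro cur parts hk
    rw [pvA_scanQuote, dif_neg hc]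
    rcases Nat.lt_or_ge k n with hkn | hkn
    · -- cs[k] = '"' : the quote closes here
      have hq : cs.getD k ' ' = '"' := by by_contra hne; exact hc ⟨hkn, hne⟩
      rw [pv_drop_cons cs k (by omega)]
      simp only [pvB_go, hq, if_pos hkn, pv_seg_nil]
      simp
    · -- k = n : end of string inside an unterminated quote
      have hke : k = n := by omega
      have hd : List.drop n cs = [] := List.drop_eq_nil_of_le (by omega)
      rw [List.drop_eq_nil_of_le (by omega), pv_seg_nil]
      simp [pvB_go, hke, hd]

-- B in identifier state, from position k, equals A's identifier-scan outcome
theorem pvB_ident (cs : List Char) (n : Nat) (hn : n = cs.length) (k : Nat) :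
    ∀ (cur : List Char) (parts : List String), k ≤ n →
    pvB_go (cs.drop k) 2 cur parts =
      pvB_go (cs.drop (pvA_scanIdent cs n k)) 0 []
        (parts ++ [String.ofList (cur ++ (cs.take (pvA_scanIdent cs n k)).drop k)]) := by
  induction k using pvA_scanIdent.induct (cs := cs) (n := n) with
  | case1 k hc ih =>
    intro cur parts hk
    obtain ⟨hkn, hcond⟩ := hc
    rw [pvA_scanIdent, dif_pos ⟨hkn, hcond⟩]
    have hj1 : k + 1 ≤ pvA_scanIdent cs n (k + 1) := pvA_scanIdent_ge cs n (k + 1)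
    rw [pv_drop_cons cs k (by omega)]
    simp only [pvB_go, if_neg (by omega : ¬ (2 : Nat) = 1), if_pos hcond]
    rw [ih (cur ++ [cs.getD k ' ']) parts (by omega)]
    rw [pv_seg_cons cs _ k (by omega) (by have := pvA_scanIdent_le cs n (k + 1) (by omega); omega)]
    simp
  | case2 k hc =>
    intro cur parts hk
    rw [pvA_scanIdent, dif_neg hc, pv_seg_nil]
    rcases Nat.lt_or_ge k n with hkn | hkn
    · -- the identifier ends at a non-identifier character
      have hcond : ¬ ((cs.getD k ' ').isAlphanum ∨ cs.getD k ' ' = '_') := fun hcnd => hc ⟨hkn, hcnd⟩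
      have hna : ¬ ((cs.getD k ' ').isAlpha ∨ cs.getD k ' ' = '_') := by
        rintro (h | h)
        · exact hcond (Or.inl (pv_alpha_imp_alnum _ h))
        · exact hcond (Or.inr h)
      rw [pv_drop_cons cs k (by omega)]
      simp only [pvB_go, if_neg (by omega : ¬ (2 : Nat) = 1), if_neg hcond]
      by_cases hq2 : cs[k]?.getD ' ' = '"'
      · simp [hq2]
      · have hna2 : ¬((cs[k]?.getD ' ').isAlpha = true ∨ cs[k]?.getD ' ' = '_') := hna
        simp [hq2, hna2]
    · have hke : k = n := by omega
      rw [List.drop_eq_nil_of_le (by omega)]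
      simp [pvB_go]

-- main loop equivalence: A from position i equals B restarted in normal state on the suffix
theorem pv_main (cs : List Char) (n : Nat) (hn : n = cs.length) (i : Nat) (parts : List String) :
    pvA_loop cs n i parts = pvB_go (cs.drop i) 0 [] parts := by
  induction i, parts using pvA_loop.induct (cs := cs) (n := n) with
  | case1 i parts h c hc ih =>
    -- '.' : skipped by both
    rw [pvA_loop, dif_pos h, if_pos hc, ih, pv_drop_cons cs i (by omega)]
    simp only [pvB_go, if_neg (by omega : ¬ (0 : Nat) = 1), if_neg (by omega : ¬ (0 : Nat) = 2)]
    rw [if_neg (by rw [show cs.getD i ' ' = '.' from hc]; decide),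
        if_neg (by rw [show cs.getD i ' ' = '.' from hc]; decide)]
  | case2 i parts h c hc hq j ih =>
    -- '"' : quoted identifier
    rw [pvA_loop, dif_pos h, if_neg hc, dif_pos hq]
    refine Eq.trans ih ?_
    symm
    rw [pv_drop_cons cs i (by omega)]
    simp only [pvB_go, if_neg (by omega : ¬ (0 : Nat) = 1), if_neg (by omega : ¬ (0 : Nat) = 2),
      if_pos (show cs.getD i ' ' = '"' from hq)]
    rw [pvB_quote cs n hn (i + 1) [] parts (by omega)]
    simp only [List.nil_append, dite_eq_ite]
    rfl
  | case3 i parts h c hc hq ha j ih =>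
    -- bare identifier
    rw [pvA_loop, dif_pos h, if_neg hc, dif_neg hq, dif_pos ha]
    refine Eq.trans ih ?_
    symm
    rw [pv_drop_cons cs i (by omega)]
    simp only [pvB_go, if_neg (by omega : ¬ (0 : Nat) = 1), if_neg (by omega : ¬ (0 : Nat) = 2),
      if_neg (show ¬ cs.getD i ' ' = '"' from hq),
      if_pos (show (cs.getD i ' ').isAlpha ∨ cs.getD i ' ' = '_' from ha)]
    have hcnd : (cs.getD i ' ').isAlphanum ∨ cs.getD i ' ' = '_' := by
      rcases ha with h1 | h1
      · exact Or.inl (pv_alpha_imp_alnum _ h1)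
      · exact Or.inr h1
    -- one unfold of scanIdent: the loop condition holds at i itself
    have hstep : pvA_scanIdent cs n i = pvA_scanIdent cs n (i + 1) := by
      rw [pvA_scanIdent, dif_pos ⟨h, hcnd⟩]
    have hj : j = pvA_scanIdent cs n (i + 1) := hstep
    rw [pvB_ident cs n hn (i + 1) [cs.getD i ' '] parts (by omega), hj]
    congr 3
    have hj1 : i + 1 ≤ pvA_scanIdent cs n (i + 1) := pvA_scanIdent_ge cs n (i + 1)
    rw [pv_seg_cons cs (pvA_scanIdent cs n (i + 1)) i (by omega)
      (by have := pvA_scanIdent_le cs n (i + 1) (by omega); omega)]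
    simp
  | case4 i parts h c hc hq ha ih =>
    -- any other character: skipped by both
    rw [pvA_loop, dif_pos h, if_neg hc, dif_neg hq, dif_neg ha, ih, pv_drop_cons cs i (by omega)]
    simp only [pvB_go, if_neg (by omega : ¬ (0 : Nat) = 1), if_neg (by omega : ¬ (0 : Nat) = 2),
      if_neg (show ¬ cs.getD i ' ' = '"' from hq),
      if_neg (show ¬ ((cs.getD i ' ').isAlpha ∨ cs.getD i ' ' = '_') from ha)]
  | case5 i parts h =>
    rw [pvA_loop, dif_neg h, List.drop_eq_nil_of_le (by omega)]
    simp [pvB_go]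

-- ===== VERDICT (by name: the statement is the Claim_ definition above) =====
theorem parse_identifier_chain_py_spec : Claim_equal_parse_identifier_chain_py := by
  intro chain _
  unfold Spec_parse_identifier_chain_py parse_identifier_chain_py parse_identifier_chain_py_alt
  rw [pv_main chain.toList chain.toList.length rfl 0 []]
  simp
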